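-- pv_equiv track=rewrite | github.com/mohammadrazeghi/language-theory-project | phase2/module2.py | bit_addressing
-- ===== SOURCE A (Python) =====
-- import math
--
-- def bit_addressing(image):
--     fixed_length = len(image)
--     matrix = [['' for _ in range(fixed_length)] for _ in range(fixed_length)]
--     number_of_loops = int(math.log2(fixed_length))
--
--     for i in range(fixed_length):
--         for j in range(fixed_length):
--             bit_address = []
--             ceil, floor, left_wall, right_wall = 0, fixed_length, 0, fixed_length
--
--             for _ in range(number_of_loops):
--                 mid_horizontal = (ceil + floor) // 2
--                 mid_vertical = (left_wall + right_wall) // 2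
--
--                 if i < mid_horizontal:
--                     floor = mid_horizontal
--                     if j < mid_vertical:
--                         right_wall = mid_vertical
--                         bit_address.append('0')
--                     else:
--                         left_wall = mid_vertical
--                         bit_address.append('1')
--                 else:
--                     ceil = mid_horizontal
--                     if j < mid_vertical:
--                         right_wall = mid_vertical
--                         bit_address.append('2')
--                     else:
--                         left_wall = mid_vertical
--                         bit_address.append('3')
--
--             matrix[i][j] = ''.join(bit_address)
--
--     return matrix
-- ===== SOURCE B (Python) =====
-- def bit_addressing(image):
--     n = len(image)
--     loops = n.bit_length() - 1
--
--     def half_bits(pos):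
--         lo, hi = 0, n
--         bits = []
--         for _ in range(loops):
--             mid = (lo + hi) // 2
--             if pos < mid:
--                 bits.append(0)
--                 hi = mid
--             else:
--                 bits.append(1)
--                 lo = mid
--         return bits
--
--     row_bits = [half_bits(i) for i in range(n)]
--     col_bits = [half_bits(j) for j in range(n)]
--     return [[''.join(str(2 * a + b) for a, b in zip(rb, cb)) for cb in col_bits]
--             for rb in row_bits]
-- ===== Notes on version B (the rewrite author's own statement) =====
-- stated objective: alternative
-- what changed: A runs the coupled 4-variable (ceil/floor + left/right wall) bisection once per cell; B exploits that the row bisection depends only on i and the column bisection only on j, precomputes row_bits and col_bits in two one-dimensional passes, and forms each cell's address as the join of str(2*row_bit+col_bit) over levels.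
-- outside the precondition, e.g. on bit_addressing([]): A raises ValueError, B returns []
import Mathlib
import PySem

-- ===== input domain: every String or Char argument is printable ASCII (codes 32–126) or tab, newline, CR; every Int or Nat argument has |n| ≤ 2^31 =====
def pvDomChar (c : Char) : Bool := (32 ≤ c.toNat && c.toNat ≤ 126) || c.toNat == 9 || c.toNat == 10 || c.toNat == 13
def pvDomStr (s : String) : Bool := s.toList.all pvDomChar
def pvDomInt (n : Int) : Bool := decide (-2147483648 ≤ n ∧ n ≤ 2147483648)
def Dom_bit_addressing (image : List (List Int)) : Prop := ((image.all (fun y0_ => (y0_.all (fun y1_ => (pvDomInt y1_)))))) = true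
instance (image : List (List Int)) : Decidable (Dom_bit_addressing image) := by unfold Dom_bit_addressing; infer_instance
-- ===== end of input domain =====

-- B factors A's per-cell 4-variable bisection into one row pass and one column pass
-- (precomputed bit tables), combining digits as 2*row_bit+col_bit: simpler decomposition.

-- ===== PORT A =====
-- the inner 'for _ in range(number_of_loops)' loop: state (ceil, floor, left_wall, right_wall)
def bitLoopA (i j : Nat) : Nat → Int → Int → Int → Int → List String
  | 0, _, _, _, _ => []
  | k+1, ceil, floor, lw, rw =>
    let mh := PySem.Int.floordiv (ceil + floor) 2
    let mv := PySem.Int.floordiv (lw + rw) 2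
    if (i : Int) < mh then
      if (j : Int) < mv then "0" :: bitLoopA i j k ceil mh lw mv
      else "1" :: bitLoopA i j k ceil mh mv rw
    else
      if (j : Int) < mv then "2" :: bitLoopA i j k mh floor lw mv
      else "3" :: bitLoopA i j k mh floor mv rw

def bit_addressing (image : List (List Int)) : List (List String) :=
  let fixed_length := image.length
  let number_of_loops := Nat.log2 fixed_length   -- int(math.log2(n)), n ≥ 1 by Pre_
  (List.range fixed_length).map (fun i =>
    (List.range fixed_length).map (fun j =>
      String.join (bitLoopA i j number_of_loops 0 (fixed_length : Int) 0 (fixed_length : Int))))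

-- ===== PORT B =====
-- one-dimensional bisection: per-level bit of position pos inside [lo, hi)
def halfBits (pos : Nat) : Nat → Int → Int → List Int
  | 0, _, _ => []
  | k+1, lo, hi =>
    let mid := PySem.Int.floordiv (lo + hi) 2
    if (pos : Int) < mid then 0 :: halfBits pos k lo mid
    else 1 :: halfBits pos k mid hi

def bit_addressing_alt (image : List (List Int)) : List (List String) :=
  let n := image.length
  let loops := Nat.log2 n                        -- n.bit_length() - 1 (empty loop for n = 0)
  let rowBits := (List.range n).map (fun i => halfBits i loops 0 (n : Int))
  let colBits := (List.range n).map (fun j => halfBits j loops 0 (n : Int))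
  rowBits.map (fun rb => colBits.map (fun cb =>
    String.join (List.zipWith (fun a b => PySem.Int.toStr (2 * a + b)) rb cb)))

-- ===== PRECONDITION & SPEC =====
-- Pre_ excludes only the empty image, on which A raises ValueError (math.log2(0)).
def Pre_bit_addressing (image : List (List Int)) : Prop := image ≠ []
instance (image : List (List Int)) : Decidable (Pre_bit_addressing image) := by
  unfold Pre_bit_addressing; infer_instance
def pvWitness_bit_addressing : List (List Int) := [[1, 0], [0, 2]]

def Spec_bit_addressing (image : List (List Int)) (out : List (List String)) : Prop :=
  out = bit_addressing_alt image
instance (image : List (List Int)) (out : List (List String)) : Decidable (Spec_bit_addressing image out) := by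
  unfold Spec_bit_addressing; infer_instance

-- ===== CLAIM (what is proved, stated in full; the proofs are below) =====
def Claim_equal_bit_addressing : Prop := ∀ (image : List (List Int)), Dom_bit_addressing image → Pre_bit_addressing image → Spec_bit_addressing image (bit_addressing image)

-- ===== LEMMAS AND PROOFS =====
-- A's combined loop equals the zip of the two one-dimensional bisections.
theorem bitLoopA_eq_zip (i j : Nat) (k : Nat) :
    ∀ (c f l r : Int),
      bitLoopA i j k c f l r =
        List.zipWith (fun a b => PySem.Int.toStr (2 * a + b))
          (halfBits i k c f) (halfBits j k l r) := by
  induction k with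
  | zero => intro c f l r; rfl
  | succ k ih =>
    intro c f l r
    simp only [bitLoopA, halfBits]
    split_ifs <;> simp [List.zipWith, ih] <;> decide

theorem bit_addressing_spec : Claim_equal_bit_addressing := by
  intro image _ _
  unfold Spec_bit_addressing bit_addressing bit_addressing_alt
  simp only [List.map_map]
  refine List.map_congr_left (fun i _ => ?_)
  refine List.map_congr_left (fun j _ => ?_)
  simp [Function.comp, bitLoopA_eq_zip]

-- ===== VERDICT (by name: the statement is the Claim_ definition above) =====
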